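-- pv_equiv track=rewrite | github.com/ljeanette15/chemical-graph | circuit_tools.py | get_pauli_stack
-- ===== SOURCE A (Python) =====
-- def get_pauli_stack(hamiltonian, nqubits):
--
--     pauli_stack = []
--
--     # Add strings to stack in order of least to most identity measurements
--     for i in range(nqubits):
--
--         # Each key is a pauli measurement
--         for key in hamiltonian.keys():
--
--             pauli_string = "I" * nqubits
--
--             # Tequila hamiltonian encodes the pauli strings using tuples. The first element in the tuple is
--             # the location of the character, and the second element is the character itself
--
--             for pauli_tuple in key:
--                 pauli_string = pauli_string[:pauli_tuple[0]] + pauli_tuple[1] + pauli_string[pauli_tuple[0]+1:]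
--
--             if pauli_string.count('I') == i:
--                 pauli_stack.append(pauli_string)
--
--     return pauli_stack
-- ===== SOURCE B (Python) =====
-- def get_pauli_stack(hamiltonian, nqubits):
--     # Build each pauli string once, bucket by its identity count, then emit
--     # buckets in increasing count order (preserving key order inside each).
--     n = max(nqubits, 0)
--     buckets = [[] for _ in range(n)]
--     for key in hamiltonian.keys():
--         pauli_string = "I" * nqubits
--         for pos, ch in key:
--             pauli_string = pauli_string[:pos] + ch + pauli_string[pos + 1:]
--         cnt = pauli_string.count('I')
--         if cnt < n:
--             buckets[cnt].append(pauli_string)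
--     out = []
--     for bucket in buckets:
--         out += bucket
--     return out
-- ===== Notes on version B (the rewrite author's own statement) =====
-- stated objective: faster
-- what changed: Instead of A's outer loop over i in range(nqubits) that rebuilds and rescans every pauli string nqubits times, B builds each string once, buckets it by its 'I'-count, and concatenates the buckets in increasing-count order.
import Mathlib
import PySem

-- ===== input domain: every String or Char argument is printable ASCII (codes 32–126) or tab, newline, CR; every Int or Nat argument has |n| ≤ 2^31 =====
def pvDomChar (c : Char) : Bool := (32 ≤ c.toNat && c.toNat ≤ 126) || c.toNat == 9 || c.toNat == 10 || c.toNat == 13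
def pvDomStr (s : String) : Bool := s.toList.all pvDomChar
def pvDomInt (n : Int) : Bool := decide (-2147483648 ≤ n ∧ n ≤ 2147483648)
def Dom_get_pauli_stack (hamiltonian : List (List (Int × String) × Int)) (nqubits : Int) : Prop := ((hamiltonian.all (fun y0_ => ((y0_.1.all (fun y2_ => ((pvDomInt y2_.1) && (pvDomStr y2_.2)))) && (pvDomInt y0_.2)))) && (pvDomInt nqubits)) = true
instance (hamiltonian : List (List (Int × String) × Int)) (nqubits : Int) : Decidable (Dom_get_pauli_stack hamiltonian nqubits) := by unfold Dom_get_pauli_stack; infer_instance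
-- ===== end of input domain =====

-- B builds each pauli string ONCE and buckets it by its 'I'-count, emitting buckets in
-- order, instead of A's rebuilding every string for every i in range(nqubits) (faster).

-- shared inner loop of both Pythons: splice the key's characters into "I"*nqubits
def pvBuild (nqubits : Int) (key : List (Int × String)) : List Char :=
  key.foldl
    (fun s t =>
      PySem.List.slice s none (some t.1) ++ t.2.toList ++ PySem.List.slice s (some (t.1 + 1)) none)
    (List.replicate nqubits.toNat 'I')

-- ===== PORT A =====
def get_pauli_stack (hamiltonian : List (List (Int × String) × Int)) (nqubits : Int) : List String :=
  (PySem.List.pyRange 0 nqubits 1).foldl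
    (fun pauli_stack i =>
      hamiltonian.foldl
        (fun pauli_stack kv =>
          let pauli_string := pvBuild nqubits kv.1
          if ((PySem.Chars.count pauli_string ['I'] : Int) = i) then
            pauli_stack ++ [String.mk pauli_string]
          else pauli_stack)
        pauli_stack)
    []

-- ===== PORT B =====
def get_pauli_stack_alt (hamiltonian : List (List (Int × String) × Int)) (nqubits : Int) : List String :=
  let n := nqubits.toNat
  let buckets :=
    hamiltonian.foldl
      (fun bs kv =>
        let pauli_string := pvBuild nqubits kv.1
        let cnt := PySem.Chars.count pauli_string ['I']
        if cnt < n then bs.set cnt (bs[cnt]! ++ [String.mk pauli_string]) else bs)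
      (List.replicate n ([] : List String))
  buckets.foldl (fun out b => out ++ b) []

-- ===== PRECONDITION & SPEC =====
def Spec_get_pauli_stack (hamiltonian : List (List (Int × String) × Int)) (nqubits : Int) (out : List String) : Prop := out = get_pauli_stack_alt hamiltonian nqubits
instance (hamiltonian : List (List (Int × String) × Int)) (nqubits : Int) (out : List String) : Decidable (Spec_get_pauli_stack hamiltonian nqubits out) := by unfold Spec_get_pauli_stack; infer_instance

-- ===== CLAIM (what is proved, stated in full; the proofs are below) =====
def Claim_equal_get_pauli_stack : Prop := ∀ (hamiltonian : List (List (Int × String) × Int)) (nqubits : Int), Dom_get_pauli_stack hamiltonian nqubits → Spec_get_pauli_stack hamiltonian nqubits (get_pauli_stack hamiltonian nqubits)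

-- ===== LEMMAS AND PROOFS =====

-- characterisation of B's bucket fold: bucket j collects, in order, f of the
-- elements whose count is j
lemma bucket_fold {α β : Type} [Inhabited β] (c : α → Nat) (f : α → β) (n : Nat) :
    ∀ (l : List α) (bs : List (List β)), bs.length = n →
      l.foldl (fun bs kv => if c kv < n then bs.set (c kv) (bs[c kv]! ++ [f kv]) else bs) bs
        = (List.range n).map (fun j => bs[j]! ++ (l.filter (fun kv => c kv == j)).map f) := by
  intro l
  induction l with
  | nil =>
    intro bs hlen
    simp only [List.foldl_nil, List.filter_nil, List.map_nil, List.append_nil]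
    apply List.ext_getElem
    · simp [hlen]
    · intro i h1 h2
      simp only [List.getElem_map, List.getElem_range]
      rw [getElem!_pos bs i (by omega)]
  | cons a l ih =>
    intro bs hlen
    simp only [List.foldl_cons]
    by_cases hc : c a < n
    · rw [if_pos hc]
      rw [ih _ (by simp [hlen])]
      apply List.map_congr_left
      intro j hj
      have hjn : j < n := List.mem_range.mp hj
      by_cases hja : c a = j
      · subst hja
        rw [getElem!_pos (bs.set (c a) (bs[c a]! ++ [f a])) (c a) (by simp [hlen]; omega),
            List.getElem_set_self]
        simp [List.append_assoc]
      · rw [getElem!_pos (bs.set (c a) (bs[c a]! ++ [f a])) j (by simp [hlen]; omega),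
            List.getElem_set, if_neg hja, ← getElem!_pos bs j (by omega)]
        have hb : (c a == j) = false := by simp [hja]
        simp [hb]
    · rw [if_neg hc]
      rw [ih _ hlen]
      apply List.map_congr_left
      intro j hj
      have hjn : j < n := List.mem_range.mp hj
      have hb : (c a == j) = false := by simp; omega
      simp [hb]

-- range(nqubits) in Nat form, for every Int nqubits (empty when nqubits < 0)
lemma pyRange_toNat (nq : Int) :
    PySem.List.pyRange 0 nq 1 = (List.range nq.toNat).map (fun k : Nat => (k : Int)) := by
  by_cases h : 0 ≤ nq
  · obtain ⟨m, rfl⟩ := Int.eq_ofNat_of_zero_le h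
    rw [Int.toNat_natCast]
    exact PySem.List.pyRange_zero_natCast m
  · have h0 : nq.toNat = 0 := by omega
    rw [h0]
    simp [PySem.List.pyRange]
    omega

-- ===== VERDICT (by name: the statement is the Claim_ definition above) =====
theorem get_pauli_stack_spec : Claim_equal_get_pauli_stack := by
  intro ham nq _
  unfold Spec_get_pauli_stack
  show
    (PySem.List.pyRange 0 nq 1).foldl
      (fun pauli_stack i =>
        ham.foldl
          (fun pauli_stack kv =>
            if ((PySem.Chars.count (pvBuild nq kv.1) ['I'] : Int) = i) then
              pauli_stack ++ [String.mk (pvBuild nq kv.1)]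
            else pauli_stack)
          pauli_stack)
      []
    =
    (ham.foldl
      (fun bs kv =>
        if PySem.Chars.count (pvBuild nq kv.1) ['I'] < nq.toNat then
          bs.set (PySem.Chars.count (pvBuild nq kv.1) ['I'])
            (bs[PySem.Chars.count (pvBuild nq kv.1) ['I']]! ++ [String.mk (pvBuild nq kv.1)])
        else bs)
      (List.replicate nq.toNat ([] : List String))).foldl (fun out b => out ++ b) []
  rw [pyRange_toNat, List.foldl_map]
  rw [bucket_fold (fun kv => PySem.Chars.count (pvBuild nq kv.1) ['I'])
        (fun kv => String.mk (pvBuild nq kv.1)) nq.toNat ham _ (by simp)]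
  rw [PySem.List.foldl_append_eq_flatten]
  have hin : ∀ (acc : List String) (k : Nat),
      ham.foldl
        (fun pauli_stack kv =>
          if ((PySem.Chars.count (pvBuild nq kv.1) ['I'] : Int) = (k : Int)) then
            pauli_stack ++ [String.mk (pvBuild nq kv.1)]
          else pauli_stack) acc
      = acc ++ (ham.filter
          (fun kv => PySem.Chars.count (pvBuild nq kv.1) ['I'] == k)).map
            (fun kv => String.mk (pvBuild nq kv.1)) := by
    intro acc k
    have h2 := PySem.List.foldl_append_ite
      (p := fun kv : List (Int × String) × Int =>
        (PySem.Chars.count (pvBuild nq kv.1) ['I'] : Int) = (k : Int))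
      (f := fun kv => String.mk (pvBuild nq kv.1)) ham acc
    simpa using h2
  simp only [hin]
  rw [PySem.List.foldl_append_eq_flatMap
      (g := fun k => (ham.filter
          (fun kv => PySem.Chars.count (pvBuild nq kv.1) ['I'] == k)).map
            (fun kv => String.mk (pvBuild nq kv.1)))]
  simp only [List.nil_append]
  rw [← List.flatMap_def]
  congr 1
  funext j
  rcases Nat.lt_or_ge j nq.toNat with hj | hj
  · rw [getElem!_pos (List.replicate nq.toNat ([] : List String)) j (by simpa using hj)]
    simp
  · rw [getElem!_neg _ _ (by simpa using Nat.not_lt.mpr hj)]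
    simp [default]
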